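-- pv_equiv track=rewrite | github.com/jryea/pyRevitToolbars | WorkingToolbar/Panel.extension/JRR.tab/Test.panel/CreateBeamSystems.pushbutton/script.py | does_string_contain_word
-- ===== SOURCE A (Python) =====
-- def does_string_contain_word(full_string, word):
--   full_split_string_list = []
--   string_split_by_spaces = full_string.split()
--   for string_a in string_split_by_spaces:
--     string_dash_sublist = string_a.split('-')
--     for string_b in string_dash_sublist:
--       string_underscore_sublist = string_b.split('_')
--       for string_c in string_underscore_sublist:
--         full_split_string_list.append(string_c.upper())
--   return word.upper() in full_split_string_list
-- ===== SOURCE B (Python) =====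
-- def does_string_contain_word(full_string, word):
--     # Single character-scan tokenizer with early exit: instead of building the
--     # full list of tokens and testing membership, stream tokens and return as
--     # soon as one matches.
--     target = word.upper()
--     for piece in full_string.split():
--         token = ''
--         for ch in piece:
--             if ch == '-' or ch == '_':
--                 if token.upper() == target:
--                     return True
--                 token = ''
--             else:
--                 token += ch
--         if token.upper() == target:
--             return True
--     return False
-- ===== Notes on version B (the rewrite author's own statement) =====
-- stated objective: alternative
-- what changed: Replaces A's three nested split() loops building a full token list then testing membership with a single character-scan tokenizer that streams dash/underscore tokens within each whitespace piece and returns early on the first match.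
import Mathlib
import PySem

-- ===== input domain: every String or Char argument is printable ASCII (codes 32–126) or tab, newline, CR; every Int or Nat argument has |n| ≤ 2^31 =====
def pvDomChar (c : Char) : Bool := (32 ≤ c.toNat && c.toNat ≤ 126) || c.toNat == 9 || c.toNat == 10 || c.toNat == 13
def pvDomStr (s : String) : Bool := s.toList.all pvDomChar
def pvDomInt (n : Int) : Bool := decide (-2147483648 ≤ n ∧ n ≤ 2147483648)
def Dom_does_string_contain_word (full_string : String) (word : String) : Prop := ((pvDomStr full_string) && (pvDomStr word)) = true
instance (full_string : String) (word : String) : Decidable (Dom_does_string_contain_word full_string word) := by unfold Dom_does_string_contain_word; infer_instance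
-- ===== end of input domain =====

-- B replaces A's three nested split() loops (which build the full token list and
-- then test membership) by a single character-scan tokenizer per whitespace piece
-- with an early exit on the first matching token; same result, alternative algorithm.

-- ===== PORT A =====
-- literal transliteration of A: three nested splits appending uppercased tokens, then membership
def does_string_contain_word (full_string : String) (word : String) : Bool :=
  let full_split_string_list : List (List Char) :=
    (PySem.Chars.split₀ full_string.toList).foldl (fun acc string_a =>
      (PySem.Chars.splitOn string_a ['-']).foldl (fun acc string_b =>
        (PySem.Chars.splitOn string_b ['_']).foldl (fun acc string_c =>
          acc ++ [PySem.Chars.upper string_c]) acc) acc) []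
  full_split_string_list.contains (PySem.Chars.upper word.toList)

-- ===== PORT B =====
-- inner character loop of Source B: accumulate token, flush at '-'/'_', early True on match
def altPieceLoop (target : List Char) : List Char → List Char → Bool
  | [], token => PySem.Chars.upper token == target
  | ch :: rest, token =>
    if ch == '-' || ch == '_' then
      if PySem.Chars.upper token == target then true else altPieceLoop target rest []
    else altPieceLoop target rest (token ++ [ch])

def does_string_contain_word_alt (full_string : String) (word : String) : Bool :=
  let target := PySem.Chars.upper word.toList
  (PySem.Chars.split₀ full_string.toList).any (fun piece => altPieceLoop target piece [])

-- ===== PRECONDITION & SPEC =====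
def Spec_does_string_contain_word (full_string : String) (word : String) (out : Bool) : Prop := out = does_string_contain_word_alt full_string word
instance (full_string : String) (word : String) (out : Bool) : Decidable (Spec_does_string_contain_word full_string word out) := by unfold Spec_does_string_contain_word; infer_instance

-- ===== CLAIM (what is proved, stated in full; the proofs are below) =====
def Claim_equal_does_string_contain_word : Prop := ∀ (full_string : String) (word : String), Dom_does_string_contain_word full_string word → Spec_does_string_contain_word full_string word (does_string_contain_word full_string word)

-- ===== LEMMAS AND PROOFS =====

-- proof-only model of Python's split on a single-character separator
def pvTok (p : Char → Bool) : List Char → List (List Char)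
  | [] => [[]]
  | c :: cs => if p c then [] :: pvTok p cs else (pvTok p cs).modifyHead (fun t => c :: t)

lemma pvTok_ne_nil (p : Char → Bool) (cs : List Char) : pvTok p cs ≠ [] := by
  induction cs with
  | nil => simp [pvTok]
  | cons c cs ih =>
    simp only [pvTok]
    split
    · simp
    · cases h : pvTok p cs with
      | nil => exact absurd h ih
      | cons a l => simp [List.modifyHead]

lemma pv_modifyHead_nil_append (l : List (List Char)) :
    l.modifyHead (fun t => ([] : List Char) ++ t) = l := by
  cases l <;> simp

lemma pv_modifyHead_id (l : List (List Char)) : l.modifyHead (fun t => t) = l := by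
  cases l <;> simp

lemma splitOn_go_single (c : Char) :
    ∀ (fuel : Nat) (l cur : List Char) (acc : List (List Char)), l.length < fuel →
      PySem.Chars.splitOn.go [c] fuel l cur acc
        = acc.reverse ++ (pvTok (· == c) l).modifyHead (fun t => cur.reverse ++ t) := by
  intro fuel
  induction fuel with
  | zero => intro l cur acc h; omega
  | succ fuel ih =>
    intro l cur acc h
    cases l with
    | nil =>
      simp [PySem.Chars.splitOn.go, pvTok]
    | cons x rest =>
      by_cases hx : x = c
      · subst hx
        have : PySem.Chars.splitOn.go [x] (fuel + 1) (x :: rest) cur acc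
            = PySem.Chars.splitOn.go [x] fuel rest [] (cur.reverse :: acc) := by
          simp [PySem.Chars.splitOn.go, List.isPrefixOf]
        rw [this, ih rest [] (cur.reverse :: acc) (by simpa using Nat.lt_of_succ_lt_succ h)]
        simp [pvTok]
        cases hT : pvTok (· == x) rest with
        | nil => exact absurd hT (pvTok_ne_nil _ _)
        | cons a l => simp [List.modifyHead]
      · have : PySem.Chars.splitOn.go [c] (fuel + 1) (x :: rest) cur acc
            = PySem.Chars.splitOn.go [c] fuel rest (x :: cur) acc := by
          simp [PySem.Chars.splitOn.go, List.isPrefixOf, Ne.symm hx]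
        rw [this, ih rest (x :: cur) acc (by simpa using Nat.lt_of_succ_lt_succ h)]
        have hp : (x == c) = false := by simp [hx]
        simp only [pvTok, hp, Bool.false_eq_true, if_false]
        cases hT : pvTok (· == c) rest with
        | nil => exact absurd hT (pvTok_ne_nil _ _)
        | cons a l => simp [List.modifyHead]

lemma splitOn_single (c : Char) (s : List Char) :
    PySem.Chars.splitOn s [c] = pvTok (· == c) s := by
  have h := splitOn_go_single c (s.length + 1) s [] [] (by omega)
  simpa [PySem.Chars.splitOn, pv_modifyHead_nil_append, pv_modifyHead_id] using h

lemma pvTok_fuse (s : List Char) :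
    pvTok (fun ch => ch == '-' || ch == '_') s
      = (pvTok (· == '-') s).flatMap (pvTok (· == '_')) := by
  induction s with
  | nil => simp [pvTok]
  | cons c cs ih =>
    by_cases h1 : c = '-'
    · subst h1
      simp [pvTok, ih]
    · by_cases h2 : c = '_'
      · subst h2
        cases hT : pvTok (· == '-') cs with
        | nil => exact absurd hT (pvTok_ne_nil _ _)
        | cons h1' t1 =>
          simp [pvTok, hT, List.modifyHead, List.flatMap_cons] at ih ⊢
          exact ih
      · cases hT1 : pvTok (· == '-') cs with
        | nil => exact absurd hT1 (pvTok_ne_nil _ _)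
        | cons a1 t1 =>
          cases hT2 : pvTok (· == '_') a1 with
          | nil => exact absurd hT2 (pvTok_ne_nil _ _)
          | cons a2 t2 =>
            simp [pvTok, h1, h2, hT1, hT2, List.modifyHead, List.flatMap_cons] at ih ⊢
            rw [ih]

lemma altPieceLoop_eq (target : List Char) :
    ∀ (cs token : List Char),
      altPieceLoop target cs token
        = ((pvTok (fun ch => ch == '-' || ch == '_') cs).modifyHead
            (fun t => token ++ t)).any (fun t => PySem.Chars.upper t == target) := by
  intro cs
  induction cs with
  | nil => intro token; simp [altPieceLoop, pvTok, List.modifyHead]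
  | cons c cs ih =>
    intro token
    by_cases hc : (c == '-' || c == '_') = true
    · rw [show altPieceLoop target (c :: cs) token
          = if PySem.Chars.upper token == target then true else altPieceLoop target cs []
        from by simp [altPieceLoop, hc]]
      rw [ih]
      cases hT : pvTok (fun ch => ch == '-' || ch == '_') cs with
      | nil => exact absurd hT (pvTok_ne_nil _ _)
      | cons a l =>
        simp only [pvTok, hc, if_true, hT, List.modifyHead, List.any_cons, List.append_nil,
          List.nil_append]
        split <;> simp_all
    · cases hT : pvTok (fun ch => ch == '-' || ch == '_') cs with
      | nil => exact absurd hT (pvTok_ne_nil _ _)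
      | cons a l =>
        simp [altPieceLoop, pvTok, hc, hT, ih, List.modifyHead]

lemma pv_A_list (s : List Char) :
    (PySem.Chars.split₀ s).foldl (fun acc string_a =>
      (PySem.Chars.splitOn string_a ['-']).foldl (fun acc string_b =>
        (PySem.Chars.splitOn string_b ['_']).foldl (fun acc string_c =>
          acc ++ [PySem.Chars.upper string_c]) acc) acc) []
    = (PySem.Chars.split₀ s).flatMap (fun a =>
        (pvTok (· == '-') a).flatMap (fun b =>
          (pvTok (· == '_') b).map PySem.Chars.upper)) := by
  have h1 : ∀ (b : List Char) (acc : List (List Char)),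
      (PySem.Chars.splitOn b ['_']).foldl (fun acc string_c =>
        acc ++ [PySem.Chars.upper string_c]) acc
      = acc ++ (pvTok (· == '_') b).map PySem.Chars.upper := by
    intro b acc
    rw [PySem.List.foldl_append_singleton_eq_map, splitOn_single]
  have h2 : ∀ (a : List Char) (acc : List (List Char)),
      (PySem.Chars.splitOn a ['-']).foldl (fun acc string_b =>
        (PySem.Chars.splitOn string_b ['_']).foldl (fun acc string_c =>
          acc ++ [PySem.Chars.upper string_c]) acc) acc
      = acc ++ (pvTok (· == '-') a).flatMap (fun b =>
          (pvTok (· == '_') b).map PySem.Chars.upper) := by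
    intro a acc
    simp only [h1]
    rw [splitOn_single, PySem.List.foldl_append_eq_flatMap]
  simp only [h2]
  rw [PySem.List.foldl_append_eq_flatMap]
  simp

-- ===== VERDICT (by name: the statement is the Claim_ definition above) =====
theorem does_string_contain_word_spec : Claim_equal_does_string_contain_word := by
  intro full_string word _
  unfold Spec_does_string_contain_word does_string_contain_word does_string_contain_word_alt
  rw [pv_A_list]
  have hB : ∀ piece, altPieceLoop (PySem.Chars.upper word.toList) piece []
      = ((pvTok (· == '-') piece).flatMap (pvTok (· == '_'))).any
          (fun t => PySem.Chars.upper t == PySem.Chars.upper word.toList) := by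
    intro piece
    rw [altPieceLoop_eq, pv_modifyHead_nil_append, pvTok_fuse]
  simp only [hB]
  rw [Bool.eq_iff_iff]
  simp only [List.contains_iff_mem, List.mem_flatMap, List.mem_map, List.any_eq_true,
    beq_iff_eq]
  constructor
  · rintro ⟨a, ha, b, hb, t, ht, hEq⟩
    exact ⟨a, ha, t, ⟨b, hb, ht⟩, hEq⟩
  · rintro ⟨a, ha, t, ⟨b, hb, ht⟩, hEq⟩
    exact ⟨a, ha, b, hb, t, ht, hEq⟩
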